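-- pv_equiv track=rewrite | github.com/huangyingw/submissions | 1224.maximum-equal-frequency.289666708.Accepted.leetcode.python3.py | maxEqualFreq
-- ===== SOURCE A (Python) =====
-- from collections import defaultdict
--
-- def maxEqualFreq(nums):
--     num_to_count, count_of_counts = defaultdict(int), defaultdict(int)
--     result = 0
--     max_count = 0
--     for i, num in enumerate(nums):
--         count = num_to_count[num] + 1
--         num_to_count[num] = count
--         max_count = max(max_count, count)
--         if count != 1:
--             count_of_counts[count - 1] -= 1
--         count_of_counts[count] += 1
--         if max_count == 1:
--             result = i + 1
--         elif count_of_counts[max_count - 1] == len(num_to_count) - 1: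
--             result = i + 1
--         elif count_of_counts[max_count] == len(num_to_count) - 1 and count_of_counts[1] == 1:
--             result = i + 1
--     return result
-- ===== SOURCE B (Python) =====
-- def _removable(prefix):
--     counts = {}
--     for x in prefix:
--         counts[x] = counts.get(x, 0) + 1
--     freqs = {}
--     for c in counts.values():
--         freqs[c] = freqs.get(c, 0) + 1
--     maxf = max(counts.values())
--     distinct = len(counts)
--     return (maxf == 1
--             or freqs.get(maxf - 1, 0) == distinct - 1
--             or (freqs.get(maxf, 0) == distinct - 1 and freqs.get(1, 0) == 1))
--
--
-- def maxEqualFreq(nums):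
--     result = 0
--     for L in range(1, len(nums) + 1):
--         if _removable(nums[:L]):
--             result = L
--     return result
-- ===== Notes on version B (the rewrite author's own statement) =====
-- stated objective: simpler
-- what changed: Replaced A's incremental count-of-counts bookkeeping and running max with a per-prefix recomputation: for each prefix length L a helper rebuilds the count and frequency dictionaries from scratch and tests the removability condition directly.
import Mathlib
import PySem

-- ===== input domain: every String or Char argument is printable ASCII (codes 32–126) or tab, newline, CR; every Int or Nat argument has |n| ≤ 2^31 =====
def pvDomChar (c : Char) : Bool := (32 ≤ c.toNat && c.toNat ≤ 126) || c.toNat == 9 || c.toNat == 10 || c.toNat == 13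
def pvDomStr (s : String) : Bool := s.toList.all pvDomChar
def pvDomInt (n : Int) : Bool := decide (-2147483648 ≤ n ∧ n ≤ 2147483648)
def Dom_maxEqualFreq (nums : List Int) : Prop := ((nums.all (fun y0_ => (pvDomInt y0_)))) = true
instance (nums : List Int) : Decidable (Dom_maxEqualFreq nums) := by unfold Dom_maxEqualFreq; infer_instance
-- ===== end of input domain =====

-- B replaces A's incremental count-of-counts bookkeeping with a per-prefix recomputation and a
-- direct removability test (objective: simpler; B is asymptotically slower, no speed claim).

-- ===== PORT A =====
-- loop body of A's single pass; state = (num_to_count, count_of_counts, result, max_count)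
def stepA (st : PySem.Dict Int Int × PySem.Dict Int Int × Int × Int) (p : Int × Int) :
    PySem.Dict Int Int × PySem.Dict Int Int × Int × Int :=
  let count := st.1.getD p.2 0 + 1
  let n2c := st.1.insert p.2 count
  let maxc := max st.2.2.2 count
  let cc := if count ≠ 1 then st.2.1.insert (count - 1) (st.2.1.getD (count - 1) 0 - 1) else st.2.1
  let cc := cc.insert count (cc.getD count 0 + 1)
  let result :=
    if maxc = 1 then p.1 + 1
    else if cc.getD (maxc - 1) 0 = (n2c.size : Int) - 1 then p.1 + 1
    else if cc.getD maxc 0 = (n2c.size : Int) - 1 ∧ cc.getD 1 0 = 1 then p.1 + 1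
    else st.2.2.1
  (n2c, cc, result, maxc)

def maxEqualFreq (nums : List Int) : Int :=
  ((PySem.List.enumerate nums 0).foldl stepA
    (PySem.Dict.empty, PySem.Dict.empty, 0, 0)).2.2.1

-- ===== PORT B =====
-- the count-building loop counts[x] = counts.get(x, 0) + 1 of Source B, shared by helper and proofs
def Cnt (xs : List Int) : PySem.Dict Int Int :=
  xs.foldl (fun d x => d.insert x (d.getD x 0 + 1)) PySem.Dict.empty

-- helper _removable of Source B; counts.values is nonempty whenever pre ≠ [], so max's
-- Option default is never used on the prefixes B feeds it
def removable (pre : List Int) : Bool :=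
  let counts := Cnt pre
  let freqs := counts.values.foldl (fun d c => d.insert c (d.getD c 0 + 1)) PySem.Dict.empty
  let maxf := (PySem.List.max? counts.values (fun v => v)).getD 0
  let distinct : Int := (counts.size : Int)
  (maxf == 1) || (freqs.getD (maxf - 1) 0 == distinct - 1) ||
    ((freqs.getD maxf 0 == distinct - 1) && (freqs.getD 1 0 == 1))

def maxEqualFreq_alt (nums : List Int) : Int :=
  (PySem.List.pyRange 1 ((nums.length : Int) + 1) 1).foldl
    (fun result L => if removable (PySem.List.slice nums none (some L)) then L else result) 0

-- ===== PRECONDITION & SPEC =====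
def Spec_maxEqualFreq (nums : List Int) (out : Int) : Prop := out = maxEqualFreq_alt nums
instance (nums : List Int) (out : Int) : Decidable (Spec_maxEqualFreq nums out) := by unfold Spec_maxEqualFreq; infer_instance

-- ===== CLAIM (what is proved, stated in full; the proofs are below) =====
def Claim_equal_maxEqualFreq : Prop := ∀ (nums : List Int), Dom_maxEqualFreq nums → Spec_maxEqualFreq nums (maxEqualFreq nums)

-- ===== LEMMAS AND PROOFS =====

-- distinct elements of xs, their (Int) multiplicities, and the maximal multiplicity
def distS (xs : List Int) : List Int := PySem.Set.ofList xs

def multV (xs : List Int) : List Int := (distS xs).map (fun k => (xs.count k : Int))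

def maxM (xs : List Int) : Int := (multV xs).foldl max 0

theorem getD_Cnt (xs : List Int) (v : Int) : (Cnt xs).getD v 0 = (xs.count v : Int) := by
  unfold Cnt; rw [PySem.Dict.getD_foldl_insert_add_one]; simp

theorem keys_Cnt (xs : List Int) : (Cnt xs).keys = distS xs := by
  unfold Cnt distS
  rw [PySem.Dict.keys_foldl_insert]
  simp [PySem.Dict.keys_empty, PySem.Set.update_nil_left]

theorem nodup_keys_Cnt (xs : List Int) : (Cnt xs).keys.Nodup := by
  rw [keys_Cnt]; exact PySem.Set.nodup_ofList xs

theorem values_Cnt (xs : List Int) : (Cnt xs).values = multV xs := by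
  rw [PySem.Dict.values_eq_map_keys _ (nodup_keys_Cnt xs) 0, keys_Cnt]
  unfold multV
  exact List.map_congr_left (fun k _ => getD_Cnt xs k)

theorem size_Cnt (xs : List Int) : (Cnt xs).size = (distS xs).length := by
  have : (Cnt xs).size = (Cnt xs).keys.length := by
    simp [PySem.Dict.size, PySem.Dict.keys]
  rw [this, keys_Cnt]

theorem Cnt_concat (xs : List Int) (x : Int) :
    Cnt (xs ++ [x]) = (Cnt xs).insert x ((Cnt xs).getD x 0 + 1) := by
  unfold Cnt; rw [List.foldl_append]; rfl

theorem mem_multV_pos (xs : List Int) (v : Int) (h : v ∈ multV xs) : 1 ≤ v := by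
  unfold multV distS at h
  obtain ⟨k, hk, rfl⟩ := List.mem_map.mp h
  have : k ∈ xs := (PySem.Set.mem_ofList xs k).mp hk
  have := List.count_pos_iff.mpr this
  omega

def condC (xs : List Int) : Bool :=
  (maxM xs == 1) || (((multV xs).count (maxM xs - 1) : Int) == ((distS xs).length : Int) - 1) ||
    ((((multV xs).count (maxM xs) : Int) == ((distS xs).length : Int) - 1) &&
      (((multV xs).count 1 : Int) == 1))

theorem getD_freqs (l : List Int) (k : Int) :
    (l.foldl (fun d c => d.insert c (d.getD c 0 + 1)) PySem.Dict.empty).getD k 0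
      = (l.count k : Int) := by
  rw [PySem.Dict.getD_foldl_insert_add_one]
  simp

theorem maxf_eq_maxM (xs : List Int) (h : xs ≠ []) :
    (PySem.List.max? (multV xs) (fun v => v)).getD 0 = maxM xs := by
  have hne : multV xs ≠ [] := by
    unfold multV distS
    simp only [ne_eq, List.map_eq_nil_iff]
    intro he
    rcases List.exists_mem_of_ne_nil xs h with ⟨y, hy⟩
    have : y ∈ PySem.Set.ofList xs := (PySem.Set.mem_ofList xs y).mpr hy
    simp [he] at this
  obtain ⟨v, t, hvt⟩ := List.exists_cons_of_ne_nil hne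
  have hv1 : 1 ≤ v := mem_multV_pos xs v (by rw [hvt]; exact List.mem_cons_self)
  rw [hvt, PySem.List.max?_id_cons]
  unfold maxM
  rw [hvt]
  simp only [List.foldl_cons, Option.getD_some]
  rw [show max 0 v = v by omega]

theorem removable_eq (xs : List Int) (h : xs ≠ []) : removable xs = condC xs := by
  unfold removable
  simp only []
  rw [values_Cnt, size_Cnt, maxf_eq_maxM xs h, getD_freqs, getD_freqs, getD_freqs]
  rfl

theorem multV_concat_not_mem (xs : List Int) (x : Int) (h : x ∉ xs) :
    multV (xs ++ [x]) = multV xs ++ [1] := by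
  unfold multV distS
  rw [PySem.Set.ofList_append_singleton, PySem.Set.add_of_not_mem]
  · rw [List.map_append]
    congr 1
    · apply List.map_congr_left
      intro k hk
      have hkx : k ≠ x := by
        intro e; subst e; exact h ((PySem.Set.mem_ofList xs k).mp hk)
      simp only [List.count_append, List.count_singleton]
      have : ¬ (x = k) := fun e => hkx e.symm
      simp [this]
    · simp [List.count_append, List.count_eq_zero_of_not_mem h]
  · intro hm; exact h ((PySem.Set.mem_ofList xs x).mp hm)

theorem multV_concat_mem (xs : List Int) (x : Int) (h : x ∈ xs) :
    ∃ a b, multV xs = a ++ (xs.count x : Int) :: b ∧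
      multV (xs ++ [x]) = a ++ ((xs.count x : Int) + 1) :: b := by
  have hxS : x ∈ distS xs := (PySem.Set.mem_ofList xs x).mpr h
  obtain ⟨s1, s2, hsplit⟩ := List.append_of_mem hxS
  have hnd : (distS xs).Nodup := PySem.Set.nodup_ofList xs
  rw [hsplit] at hnd
  rw [List.nodup_append] at hnd
  have hx1 : x ∉ s1 := by
    intro hm
    have h3 := hnd.2.2
    exact absurd rfl (h3 x hm x List.mem_cons_self)
  have hx2 : x ∉ s2 := by
    have h21 := hnd.2.1
    simp [List.nodup_cons] at h21
    exact h21.1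
  refine ⟨s1.map (fun k => (xs.count k : Int)), s2.map (fun k => (xs.count k : Int)), ?_, ?_⟩
  · unfold multV; rw [hsplit]; simp
  · unfold multV distS
    rw [PySem.Set.ofList_append_singleton, PySem.Set.add_of_mem ((PySem.Set.mem_ofList xs x).mpr h)]
    show (distS xs).map _ = _
    rw [hsplit]
    simp only [List.map_append, List.map_cons]
    congr 1
    · apply List.map_congr_left
      intro k hk
      have : ¬ (x = k) := fun e => hx1 (e ▸ hk)
      simp [List.count_append, this]
    · congr 1
      · simp [List.count_append]
      · apply List.map_congr_left
        intro k hk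
        have : ¬ (x = k) := fun e => hx2 (e ▸ hk)
        simp [List.count_append, this]

theorem foldl_max_init_max (b : List Int) (s t : Int) :
    b.foldl max (max s t) = max (b.foldl max s) t := by
  induction b generalizing s with
  | nil => rfl
  | cons y ys ih =>
      simp only [List.foldl_cons]
      rw [show max (max s t) y = max (max s y) t by omega, ih]

theorem maxM_concat (xs : List Int) (x : Int) :
    maxM (xs ++ [x]) = max (maxM xs) ((xs.count x : Int) + 1) := by
  by_cases h : x ∈ xs
  · obtain ⟨a, b, h1, h2⟩ := multV_concat_mem xs x h
    unfold maxM
    rw [h1, h2]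
    simp only [List.foldl_append, List.foldl_cons]
    rw [show max (a.foldl max 0) ((xs.count x : Int) + 1) =
          max (max (a.foldl max 0) (xs.count x : Int)) ((xs.count x : Int) + 1) by omega]
    rw [foldl_max_init_max]
  · unfold maxM
    rw [multV_concat_not_mem xs x h]
    simp [List.count_eq_zero_of_not_mem h]

theorem maxM_pos (xs : List Int) (x : Int) (h : x ∈ xs) : 1 ≤ maxM xs := by
  have hxS : x ∈ distS xs := (PySem.Set.mem_ofList xs x).mpr h
  have hv : ((xs.count x : Int)) ∈ multV xs := by
    unfold multV; exact List.mem_map.mpr ⟨x, hxS, rfl⟩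
  have hc : 1 ≤ (xs.count x : Int) := by
    have := List.count_pos_iff.mpr h; omega
  have := (PySem.List.le_foldl_max (multV xs) 0).2 _ hv
  unfold maxM; omega

def runA (xs : List Int) : PySem.Dict Int Int × PySem.Dict Int Int × Int × Int :=
  (PySem.List.enumerate xs 0).foldl stepA (PySem.Dict.empty, PySem.Dict.empty, 0, 0)

theorem runA_concat (xs : List Int) (x : Int) :
    runA (xs ++ [x]) = stepA (runA xs) ((xs.length : Int), x) := by
  unfold runA
  rw [PySem.List.enumerate_append, List.foldl_append]
  simp [PySem.List.enumerate_cons, PySem.List.enumerate_nil]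

theorem alt_concat (xs : List Int) (x : Int) :
    maxEqualFreq_alt (xs ++ [x]) =
      if removable (xs ++ [x]) then (xs.length : Int) + 1 else maxEqualFreq_alt xs := by
  unfold maxEqualFreq_alt
  have hlen : ((xs ++ [x]).length : Int) + 1 = ((xs.length : Int) + 1) + 1 := by
    simp
  rw [hlen]
  rw [PySem.List.pyRange_one_succ_right (by omega : (1:Int) ≤ (xs.length : Int) + 1)]
  rw [List.foldl_append]
  simp only [List.foldl_cons, List.foldl_nil]
  have hslice : PySem.List.slice (xs ++ [x]) none (some ((xs.length : Int) + 1)) = xs ++ [x] := by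
    rw [show ((xs.length : Int) + 1) = (((xs ++ [x]).length : Nat) : Int) by simp]
    rw [PySem.List.slice_to_natCast]
    exact List.take_length
  rw [hslice]
  congr 1
  apply PySem.List.foldl_congr_mem
  intro acc L hL
  have hmem := (PySem.List.mem_pyRange_one).mp hL
  have h0 : 0 ≤ L := by omega
  have hLle : L.toNat ≤ xs.length := by omega
  rw [show PySem.List.slice (xs ++ [x]) none (some L) = (xs ++ [x]).take L.toNat from
        PySem.List.slice_to _ h0,
      show PySem.List.slice xs none (some L) = xs.take L.toNat from PySem.List.slice_to _ h0,
      List.take_append_of_le_length hLle]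

theorem cc_step (xs : List Int) (x : Int) (cc : PySem.Dict Int Int)
    (hcc : ∀ k : Int, 1 ≤ k → cc.getD k 0 = ((multV xs).count k : Int)) (k : Int) (hk : 1 ≤ k) :
    ((if ((xs.count x : Int) + 1) ≠ 1 then
        cc.insert ((xs.count x : Int) + 1 - 1) (cc.getD ((xs.count x : Int) + 1 - 1) 0 - 1)
      else cc).insert ((xs.count x : Int) + 1)
        ((if ((xs.count x : Int) + 1) ≠ 1 then
            cc.insert ((xs.count x : Int) + 1 - 1) (cc.getD ((xs.count x : Int) + 1 - 1) 0 - 1)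
          else cc).getD ((xs.count x : Int) + 1) 0 + 1)).getD k 0
      = ((multV (xs ++ [x])).count k : Int) := by
  by_cases hx : x ∈ xs
  · have hc1 : 1 ≤ (xs.count x : Int) := by have := List.count_pos_iff.mpr hx; omega
    obtain ⟨a, b, hV, hV'⟩ := multV_concat_mem xs x hx
    rw [if_pos (by omega : ((xs.count x : Int) + 1) ≠ 1)]
    rw [show (xs.count x : Int) + 1 - 1 = (xs.count x : Int) by ring]
    rw [PySem.Dict.getD_insert, PySem.Dict.getD_insert, PySem.Dict.getD_insert]
    rw [hcc ((xs.count x : Int) + 1) (by omega), hcc (xs.count x : Int) hc1, hcc k hk]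
    rw [hV, hV']
    simp only [List.count_append, List.count_cons, beq_iff_eq]
    split_ifs <;> subst_vars <;> push_cast <;> omega
  · have hc0 : xs.count x = 0 := List.count_eq_zero_of_not_mem hx
    rw [multV_concat_not_mem xs x hx]
    rw [hc0]
    rw [if_neg (by norm_num)]
    rw [PySem.Dict.getD_insert]
    rw [show ((0:Nat):Int) + 1 = (1:Int) by norm_num]
    rw [hcc 1 (by omega), hcc k hk]
    simp only [List.count_append, List.count_cons, List.count_nil, beq_iff_eq]
    split_ifs <;> subst_vars <;> push_cast <;> omega

theorem runA_spec (xs : List Int) :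
    (runA xs).1 = Cnt xs ∧
    (∀ k : Int, 1 ≤ k → (runA xs).2.1.getD k 0 = ((multV xs).count k : Int)) ∧
    (runA xs).2.2.2 = maxM xs ∧
    (runA xs).2.2.1 = maxEqualFreq_alt xs := by
  induction xs using List.reverseRecOn with
  | nil =>
      refine ⟨rfl, ?_, rfl, ?_⟩
      · intro k hk
        simp [runA, PySem.List.enumerate_nil, multV, distS, PySem.Dict.getD_empty]
      · simp [runA, maxEqualFreq_alt, PySem.List.enumerate_nil,
          PySem.List.pyRange_one_eq_nil]
  | append_singleton xs x ih =>
      obtain ⟨h1, h2, h3, h4⟩ := ih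
      rw [runA_concat]
      simp only [stepA]
      rw [h1, h3, getD_Cnt]
      have hCnt : (Cnt xs).insert x ((xs.count x : Int) + 1) = Cnt (xs ++ [x]) := by
        rw [Cnt_concat, getD_Cnt]
      have hMax : max (maxM xs) ((xs.count x : Int) + 1) = maxM (xs ++ [x]) :=
        (maxM_concat xs x).symm
      have Hcc := cc_step xs x (runA xs).2.1 h2
      rw [hCnt, hMax]
      refine ⟨rfl, Hcc, rfl, ?_⟩
      rw [size_Cnt, h4, alt_concat xs x, removable_eq _ (by simp)]
      by_cases h1m : maxM (xs ++ [x]) = 1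
      · simp [condC, h1m]
      · have hM2 : 2 ≤ maxM (xs ++ [x]) := by
          have := maxM_pos (xs ++ [x]) x (by simp); omega
        rw [if_neg h1m]
        rw [Hcc (maxM (xs ++ [x]) - 1) (by omega), Hcc (maxM (xs ++ [x])) (by omega),
            Hcc 1 (by omega)]
        by_cases hP2 : (((multV (xs ++ [x])).count (maxM (xs ++ [x]) - 1) : Int)
            = ((distS (xs ++ [x])).length : Int) - 1)
        · rw [if_pos hP2, if_pos (show condC (xs ++ [x]) = true by simp [condC, hP2])]
        · rw [if_neg hP2]
          by_cases hP3 : (((multV (xs ++ [x])).count (maxM (xs ++ [x])) : Int)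
              = ((distS (xs ++ [x])).length : Int) - 1)
              ∧ (((multV (xs ++ [x])).count 1 : Int) = 1)
          · rw [if_pos hP3,
              if_pos (show condC (xs ++ [x]) = true by simp [condC, hP3.1, hP3.2])]
          · rw [if_neg hP3]
            rw [if_neg (show ¬ condC (xs ++ [x]) = true by
              simp only [condC, Bool.or_eq_true, Bool.and_eq_true, beq_iff_eq]
              intro hcon
              rcases hcon with (h | h) | h
              · exact h1m h
              · exact hP2 h
              · exact hP3 h)]

-- ===== VERDICT (by name: the statement is the Claim_ definition above) =====
theorem maxEqualFreq_spec : Claim_equal_maxEqualFreq := by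
  intro nums _
  show maxEqualFreq nums = maxEqualFreq_alt nums
  exact (runA_spec nums).2.2.2
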